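-- pv_equiv track=rewrite | github.com/onionmixer/MDDataFuseDriver | resource/analysis/ws53_mdmgr_farptr_loadseg_feasibility.py | feasible_s_range
-- ===== SOURCE A (Python) =====
-- def feasible_s_range(seg: int, off: int, img_len: int):
--     # 0 <= ((seg-S)<<4)+off < img_len
--     ok = []
--     for S in range(0x0000, 0x10000):
--         lin = ((seg - S) << 4) + off
--         if 0 <= lin < img_len:
--             ok.append(S)
--     if not ok:
--         return None
--     return min(ok), max(ok), len(ok)
-- ===== SOURCE B (Python) =====
-- def feasible_s_range(seg: int, off: int, img_len: int):
--     # Solve 0 <= ((seg - S) << 4) + off < img_len for S directly: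
--     # S ranges over one contiguous interval, clamped to [0, 0x10000).
--     T = (seg << 4) + off
--     lo = max((T - img_len) // 16 + 1, 0)
--     hi = min(T // 16, 0xFFFF)
--     if lo > hi:
--         return None
--     return lo, hi, hi - lo + 1
-- ===== Notes on version B (the rewrite author's own statement) =====
-- stated objective: faster
-- what changed: Replaces the scan of all 65536 segment values with a closed-form solution of the linear inequality for S, clamped to [0,0x10000), giving min/max/count directly.
import Mathlib
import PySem

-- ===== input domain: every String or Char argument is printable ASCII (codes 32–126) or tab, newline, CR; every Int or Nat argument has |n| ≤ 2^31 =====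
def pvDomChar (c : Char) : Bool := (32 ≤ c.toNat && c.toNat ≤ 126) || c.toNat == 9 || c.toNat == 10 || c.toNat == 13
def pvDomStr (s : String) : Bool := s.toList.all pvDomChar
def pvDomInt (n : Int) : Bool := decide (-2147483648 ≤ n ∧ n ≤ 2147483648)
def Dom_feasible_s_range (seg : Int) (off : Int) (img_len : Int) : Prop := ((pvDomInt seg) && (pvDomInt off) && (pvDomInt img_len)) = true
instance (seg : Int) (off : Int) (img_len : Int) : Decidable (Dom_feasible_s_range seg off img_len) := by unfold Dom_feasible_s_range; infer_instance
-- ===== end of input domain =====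

-- B replaces A's scan of all 65536 segment values with a closed-form solution of
-- the linear inequality for S, clamped to [0, 0x10000) (objective: faster, O(1)).

-- ===== PORT A =====
def feasible_s_range (seg : Int) (off : Int) (img_len : Int) : Option (List Int) :=
  let ok := (PySem.List.pyRange 0 65536 1).foldl
    (fun acc S =>
      if 0 ≤ ((seg - S) <<< (4 : Nat)) + off ∧ ((seg - S) <<< (4 : Nat)) + off < img_len
      then acc ++ [S] else acc) []
  if ok = [] then none
  else some [(PySem.List.min? ok (fun x => x)).getD 0,
             (PySem.List.max? ok (fun x => x)).getD 0,
             (ok.length : Int)]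

-- ===== PORT B =====
def feasible_s_range_alt (seg : Int) (off : Int) (img_len : Int) : Option (List Int) :=
  let T := (seg <<< (4 : Nat)) + off
  let lo := max (PySem.Int.floordiv (T - img_len) 16 + 1) 0
  let hi := min (PySem.Int.floordiv T 16) 65535
  if lo > hi then none else some [lo, hi, hi - lo + 1]

-- ===== PRECONDITION & SPEC =====
def Spec_feasible_s_range (seg : Int) (off : Int) (img_len : Int) (out : Option (List Int)) : Prop := out = feasible_s_range_alt seg off img_len
instance (seg : Int) (off : Int) (img_len : Int) (out : Option (List Int)) : Decidable (Spec_feasible_s_range seg off img_len out) := by unfold Spec_feasible_s_range; infer_instance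

-- ===== CLAIM (what is proved, stated in full; the proofs are below) =====
def Claim_equal_feasible_s_range : Prop := ∀ (seg : Int) (off : Int) (img_len : Int), Dom_feasible_s_range seg off img_len → Spec_feasible_s_range seg off img_len (feasible_s_range seg off img_len)

-- ===== LEMMAS AND PROOFS =====

-- Filtering an interval predicate out of a unit-step range yields the clamped range.
theorem filter_pyRange_interval (lo hi : Int) : ∀ (n : Nat) (a : Int),
    (PySem.List.pyRange a (a + (n : Int)) 1).filter (fun S => decide (lo ≤ S ∧ S ≤ hi))
      = PySem.List.pyRange (max a lo) (min (a + (n : Int)) (hi + 1)) 1 := by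
  intro n
  induction n with
  | zero =>
      intro a
      rw [PySem.List.pyRange_one_eq_nil (a := a) (b := a + ((0 : Nat) : Int)) (by omega),
          List.filter_nil,
          Eq.symm (PySem.List.pyRange_one_eq_nil (a := max a lo)
            (b := min (a + ((0 : Nat) : Int)) (hi + 1)) (by omega))]
  | succ n ih =>
      intro a
      rw [PySem.List.pyRange_one_cons (a := a) (b := a + ((n + 1 : Nat) : Int)) (by omega),
          List.filter_cons]
      have hsh : a + ((n + 1 : Nat) : Int) = (a + 1) + (n : Int) := by push_cast; ring
      rw [hsh, ih (a + 1)]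
      by_cases hin : lo ≤ a ∧ a ≤ hi
      · rw [decide_eq_true (by exact hin)]
        simp only [ite_true]
        rw [show max a lo = a by omega,
            PySem.List.pyRange_one_cons (a := a) (b := min (a + 1 + (n : Int)) (hi + 1))
              (by omega),
            show max (a + 1) lo = a + 1 by omega]
      · rw [decide_eq_false hin]
        simp only [Bool.false_eq_true, ite_false]
        by_cases hlo : lo ≤ a
        · -- then hi < a : both sides empty
          have hhi : hi < a := by omega
          rw [PySem.List.pyRange_one_eq_nil (a := max (a + 1) lo)
                (b := min (a + 1 + (n : Int)) (hi + 1)) (by omega),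
              PySem.List.pyRange_one_eq_nil (a := max a lo)
                (b := min (a + 1 + (n : Int)) (hi + 1)) (by omega)]
        · rw [show max (a + 1) lo = max a lo by omega]

theorem min?_pyRange (a b : Int) (h : a < b) :
    PySem.List.min? (PySem.List.pyRange a b 1) (fun x => x) = some a := by
  cases hm : PySem.List.min? (PySem.List.pyRange a b 1) (fun x => x) with
  | none =>
      have hnil := (PySem.List.min?_eq_none_iff (xs := PySem.List.pyRange a b 1)
        (key := fun x => x)).mp hm
      rw [PySem.List.pyRange_one_cons h] at hnil
      exact absurd hnil (List.cons_ne_nil _ _)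
  | some m =>
      have hmem := PySem.List.min?_mem hm
      have hlow := PySem.List.min?_isMin hm a
        (by rw [PySem.List.mem_pyRange_one]; omega)
      rw [PySem.List.mem_pyRange_one] at hmem
      congr 1
      omega

theorem max?_pyRange (a b : Int) (h : a < b) :
    PySem.List.max? (PySem.List.pyRange a b 1) (fun x => x) = some (b - 1) := by
  cases hm : PySem.List.max? (PySem.List.pyRange a b 1) (fun x => x) with
  | none =>
      have hnil := (PySem.List.max?_eq_none_iff (xs := PySem.List.pyRange a b 1)
        (key := fun x => x)).mp hm
      rw [PySem.List.pyRange_one_cons h] at hnil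
      exact absurd hnil (List.cons_ne_nil _ _)
  | some m =>
      have hmem := PySem.List.max?_mem hm
      have hhigh := PySem.List.max?_isMax hm (b - 1)
        (by rw [PySem.List.mem_pyRange_one]; omega)
      rw [PySem.List.mem_pyRange_one] at hmem
      congr 1
      omega

-- ===== VERDICT (by name: the statement is the Claim_ definition above) =====
theorem feasible_s_range_spec : Claim_equal_feasible_s_range := by
  intro seg off img_len _
  unfold Spec_feasible_s_range feasible_s_range feasible_s_range_alt
  simp only []
  set T := (seg <<< (4 : Nat)) + off with hT
  set lo := PySem.Int.floordiv (T - img_len) 16 + 1 with hlo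
  set hi := PySem.Int.floordiv T 16 with hhi
  have hfd1 : (lo - 1) * 16 ≤ T - img_len ∧ T - img_len < lo * 16 := by
    have := (PySem.Int.floordiv_eq_iff_of_pos
      (a := T - img_len) (b := 16) (q := PySem.Int.floordiv (T - img_len) 16)
      (by norm_num)).mp rfl
    constructor
    · calc (lo - 1) * 16 = PySem.Int.floordiv (T - img_len) 16 * 16 := by rw [hlo]; ring
        _ ≤ T - img_len := this.1
    · calc T - img_len < (PySem.Int.floordiv (T - img_len) 16 + 1) * 16 := this.2
        _ = lo * 16 := by rw [hlo]
  have hfd2 : hi * 16 ≤ T ∧ T < (hi + 1) * 16 :=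
    (PySem.Int.floordiv_eq_iff_of_pos (a := T) (b := 16) (q := hi) (by norm_num)).mp rfl
  have hsh : ∀ x : Int, x <<< (4 : Nat) = x * 16 := by
    intro x; rw [Int.shiftLeft_eq]; norm_num
  have hTe : T = seg * 16 + off := by rw [hT, hsh]
  have hpred : ∀ S : Int,
      (0 ≤ ((seg - S) <<< (4 : Nat)) + off ∧ ((seg - S) <<< (4 : Nat)) + off < img_len)
        ↔ (lo ≤ S ∧ S ≤ hi) := by
    intro S
    rw [hsh (seg - S)]
    constructor
    · rintro ⟨h1, h2⟩
      constructor <;> nlinarith [hfd1.1, hfd1.2, hfd2.1, hfd2.2]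
    · rintro ⟨h1, h2⟩
      constructor <;> nlinarith [hfd1.1, hfd1.2, hfd2.1, hfd2.2]
  have hfold : (PySem.List.pyRange 0 65536 1).foldl
      (fun acc S =>
        if 0 ≤ ((seg - S) <<< (4 : Nat)) + off ∧ ((seg - S) <<< (4 : Nat)) + off < img_len
        then acc ++ [S] else acc) ([] : List Int)
      = PySem.List.pyRange (max 0 lo) (min 65536 (hi + 1)) 1 := by
    rw [PySem.List.foldl_append_ite_eq_filter]
    rw [List.filter_congr (fun S _ => by
      show decide _ = decide (lo ≤ S ∧ S ≤ hi)
      simp only [decide_eq_decide]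
      exact hpred S)]
    have h0 : (0 : Int) + ((65536 : Nat) : Int) = 65536 := by norm_num
    rw [← h0, filter_pyRange_interval lo hi 65536 0, h0, List.nil_append]
  rw [hfold]
  by_cases hne : max 0 lo < min 65536 (hi + 1)
  · rw [if_neg (by rw [PySem.List.pyRange_one_cons hne]; exact List.cons_ne_nil _ _),
        if_neg (by omega)]
    rw [min?_pyRange _ _ hne, max?_pyRange _ _ hne, PySem.List.length_pyRange_one]
    simp only [Option.getD_some]
    have e1 : max 0 lo = max (lo) 0 := by omega
    have e2 : min 65536 (hi + 1) - 1 = min hi 65535 := by omega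
    have e3 : ((min 65536 (hi + 1) - max lo 0).toNat : Int)
        = min hi 65535 - max lo 0 + 1 := by omega
    rw [e1, e2, e3]
  · rw [PySem.List.pyRange_one_eq_nil (by omega), if_pos rfl, if_pos (by omega)]
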